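-- pv_equiv track=rewrite | github.com/lsyurea/different-sorting-algorithms | Different ways of sorting.py | sizing
-- ===== SOURCE A (Python) =====
-- def sizing(matrix):
--     new_arr = []
--     for row in matrix:
--         for element in row:
--             new_arr.append(element)
--     def merge(left, right):
--         arr = []
--         while left and right:
--             if left[0] < right[0]:
--                 arr.append(left.pop(0))
--             else:
--                 arr.append(right.pop(0))
--         arr.extend(left)
--         arr.extend(right)
--         return arr
--
--     def merge_sort(arr):
--         if len(arr) < 2:
--             return arr
--         else:
--             left = arr[:len(arr)//2]
--             right = arr[len(arr)//2:]
--             return merge(merge_sort(left), merge_sort(right))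
--
--     sorted = merge_sort(new_arr)
--
--     def arrange(arr):
--         if len(arr) < 3:
--             return arr
--         return [arr[-2]] + arrange(arr[:-2]) + [arr[-1]]
--
--     m, n = len(matrix), len(matrix[0])
--     new_matrix = []
--     for i in range(m):
--         row_involved = sorted[:n]
--         sorted = sorted[n:]
--         new_matrix.append(arrange(row_involved))
--
--     return arrange(new_matrix)
-- ===== SOURCE B (Python) =====
-- def arrange(a):
--     # one pass with swapping accumulators: after processing a prefix, d is the
--     # "descending" front part of the arrangement and ar the reversed back part
--     d, ar = [], []
--     for x in a:
--         d, ar = ar, [x] + d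
--     return d + ar[::-1]
--
--
-- def sizing(matrix):
--     flat = sorted(x for row in matrix for x in row)
--     m, n = len(matrix), len(matrix[0])
--     rows = [arrange(flat[i * n:(i + 1) * n]) for i in range(m)]
--     return arrange(rows)
-- ===== Notes on version B (the rewrite author's own statement) =====
-- stated objective: faster
-- what changed: A hand-rolls a merge sort whose merge pops from the front of lists (quadratic) and builds each arranged row by deep recursion on slices; B sorts the flattened matrix once with the builtin sorted(), chunks it by index arithmetic, and produces each arrangement in a single left-to-right fold that swaps two accumulators.
import Mathlib
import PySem

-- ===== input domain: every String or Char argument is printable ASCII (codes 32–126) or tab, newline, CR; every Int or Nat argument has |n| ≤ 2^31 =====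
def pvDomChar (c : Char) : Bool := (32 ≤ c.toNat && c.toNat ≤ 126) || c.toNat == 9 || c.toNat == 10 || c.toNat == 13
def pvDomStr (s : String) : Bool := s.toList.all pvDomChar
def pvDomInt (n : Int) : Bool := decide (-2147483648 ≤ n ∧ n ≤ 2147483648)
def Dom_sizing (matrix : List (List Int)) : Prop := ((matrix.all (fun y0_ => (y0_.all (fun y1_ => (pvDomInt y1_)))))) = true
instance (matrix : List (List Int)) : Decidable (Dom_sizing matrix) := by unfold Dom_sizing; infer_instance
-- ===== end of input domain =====

-- B replaces A's pop(0) merge sort by the builtin sort and A's recursive `arrange`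
-- by one fold with two swapping accumulators (objective: faster).

-- ===== PORT A =====

-- A's `merge`: the while-loop popping the smaller head, then extending with the leftovers
def mergeA : List Int → List Int → List Int
  | [], right => right
  | left, [] => left
  | a :: l, b :: r => if a < b then a :: mergeA l (b :: r) else b :: mergeA (a :: l) r

-- termination facts for the slices arr[:len//2] / arr[len//2:] (cited in decreasing_by and the proofs)
theorem sliceHalfLeft {α : Type} (xs : List α) :
    PySem.List.slice xs none (some (PySem.Int.floordiv (xs.length : Int) 2)) = xs.take (xs.length / 2) := by
  rw [PySem.Int.floordiv_eq_ediv_of_pos (by omega)]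
  rw [PySem.List.slice_to _ (by positivity)]
  have h2 : ((xs.length : Int) / 2).toNat = xs.length / 2 := by omega
  rw [h2]

theorem sliceHalfRight {α : Type} (xs : List α) :
    PySem.List.slice xs (some (PySem.Int.floordiv (xs.length : Int) 2)) none = xs.drop (xs.length / 2) := by
  rw [PySem.Int.floordiv_eq_ediv_of_pos (by omega)]
  rw [PySem.List.slice_from _ (by positivity)]
  have h2 : ((xs.length : Int) / 2).toNat = xs.length / 2 := by omega
  rw [h2]

-- A's `merge_sort`
def mergeSortA (arr : List Int) : List Int :=
  if arr.length < 2 then arr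
  else
    mergeA (mergeSortA (PySem.List.slice arr none (some (PySem.Int.floordiv (arr.length : Int) 2))))
           (mergeSortA (PySem.List.slice arr (some (PySem.Int.floordiv (arr.length : Int) 2)) none))
termination_by arr.length
decreasing_by
  · rw [sliceHalfLeft]; simp; omega
  · rw [sliceHalfRight]; simp; omega

-- termination fact for arr[:-2] (cited in decreasing_by and the proofs)
theorem sliceDropLastTwo {α : Type} (xs : List α) :
    PySem.List.slice xs none (some (-2)) = xs.take (xs.length - 2) :=
  PySem.List.slice_to_neg_ofNat xs 2 (by omega)

-- A's recursive `arrange`:  [arr[-2]] + arrange(arr[:-2]) + [arr[-1]]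
def arrangeA {α : Type} (arr : List α) : List α :=
  if arr.length < 3 then arr
  else (PySem.List.pyGet? arr (-2)).toList
        ++ arrangeA (PySem.List.slice arr none (some (-2)))
        ++ (PySem.List.pyGet? arr (-1)).toList
termination_by arr.length
decreasing_by rw [sliceDropLastTwo]; simp; omega

def sizing (matrix : List (List Int)) : List (List Int) :=
  let new_arr := matrix.foldl (fun acc row => row.foldl (fun a e => a ++ [e]) acc) ([] : List Int)
  let sorted0 := mergeSortA new_arr
  let m := matrix.length
  let n := (PySem.List.pyGetD matrix 0 []).length   -- matrix[0]; IndexError on [] is excluded by Pre_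
  let st := (PySem.List.pyRange 0 (m : Int) 1).foldl
      (fun (st : List Int × List (List Int)) _ =>
        (PySem.List.slice st.1 (some (n : Int)) none,
         st.2 ++ [arrangeA (PySem.List.slice st.1 none (some (n : Int)))]))
      (sorted0, [])
  arrangeA st.2

-- ===== PORT B =====

-- B's `arrange`: one fold, swapping the two accumulators each step ('d, ar = ar, [x] + d')
def arrangeB {α : Type} (a : List α) : List α :=
  let st := a.foldl (fun (st : List α × List α) x => (st.2, x :: st.1)) (([] : List α), ([] : List α))
  st.1 ++ st.2.reverse

def sizing_alt (matrix : List (List Int)) : List (List Int) :=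
  let flat := PySem.List.sorted (matrix.flatMap (fun row => row)) (fun x => x) false
  let m := matrix.length
  let n := (PySem.List.pyGetD matrix 0 []).length   -- matrix[0]; IndexError on [] is excluded by Pre_
  let rows := (PySem.List.pyRange 0 (m : Int) 1).map (fun i =>
    arrangeB (PySem.List.slice flat (some (i * (n : Int))) (some ((i + 1) * (n : Int)))))
  arrangeB rows

-- ===== PRECONDITION & SPEC =====
-- Pre_ excludes only the empty matrix, on which A raises IndexError at matrix[0] (B raises there too).
def Pre_sizing (matrix : List (List Int)) : Prop := matrix ≠ []
instance (matrix : List (List Int)) : Decidable (Pre_sizing matrix) := by unfold Pre_sizing; infer_instance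

def pvWitness_sizing : List (List Int) := [[3, 1, 2], [0, 5, 4]]

def Spec_sizing (matrix : List (List Int)) (out : List (List Int)) : Prop := out = sizing_alt matrix
instance (matrix : List (List Int)) (out : List (List Int)) : Decidable (Spec_sizing matrix out) := by unfold Spec_sizing; infer_instance

-- ===== CLAIM (what is proved, stated in full; the proofs are below) =====
def Claim_equal_sizing : Prop := ∀ (matrix : List (List Int)), Dom_sizing matrix → Pre_sizing matrix → Spec_sizing matrix (sizing matrix)

-- ===== LEMMAS AND PROOFS =====

theorem mergeA_perm (l r : List Int) : (mergeA l r).Perm (l ++ r) := by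
  fun_induction mergeA l r with
  | case1 r => simp
  | case2 l h => simp
  | case3 a l b r hlt ih => exact ih.cons a
  | case4 a l b r hlt ih => exact (ih.cons b).trans List.perm_middle.symm

theorem mergeA_pairwise (l r : List Int) (hl : l.Pairwise (· ≤ ·)) (hr : r.Pairwise (· ≤ ·)) :
    (mergeA l r).Pairwise (· ≤ ·) := by
  fun_induction mergeA l r with
  | case1 r => exact hr
  | case2 l h => exact hl
  | case3 a l b r hlt ih =>
      refine List.pairwise_cons.2 ⟨?_, ih (List.pairwise_cons.1 hl).2 hr⟩
      intro y hy
      rcases List.mem_append.1 ((mergeA_perm l (b :: r)).mem_iff.1 hy) with h1 | h1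
      · exact (List.pairwise_cons.1 hl).1 y h1
      · rcases List.mem_cons.1 h1 with rfl | h2
        · exact le_of_lt hlt
        · exact le_of_lt (lt_of_lt_of_le hlt ((List.pairwise_cons.1 hr).1 y h2))
  | case4 a l b r hlt ih =>
      refine List.pairwise_cons.2 ⟨?_, ih hl (List.pairwise_cons.1 hr).2⟩
      intro y hy
      rcases List.mem_append.1 ((mergeA_perm (a :: l) r).mem_iff.1 hy) with h1 | h1
      · rcases List.mem_cons.1 h1 with rfl | h2
        · omega
        · exact le_trans (by omega) ((List.pairwise_cons.1 hl).1 y h2)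
      · exact (List.pairwise_cons.1 hr).1 y h1

theorem mergeSortA_perm (arr : List Int) : (mergeSortA arr).Perm arr := by
  fun_induction mergeSortA arr with
  | case1 arr h => exact List.Perm.refl arr
  | case2 arr h ih1 ih2 =>
      rw [sliceHalfLeft] at ih1
      rw [sliceHalfRight] at ih2
      rw [sliceHalfLeft, sliceHalfRight]
      refine (mergeA_perm _ _).trans ?_
      simpa [List.take_append_drop] using ih1.append ih2

theorem mergeSortA_pairwise (arr : List Int) : (mergeSortA arr).Pairwise (· ≤ ·) := by
  fun_induction mergeSortA arr with
  | case1 arr h =>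
      rcases arr with _ | ⟨a, _ | ⟨b, t⟩⟩ <;> simp_all
  | case2 arr h ih1 ih2 => exact mergeA_pairwise _ _ ih1 ih2

theorem mergeSortA_eq_sorted (arr : List Int) :
    mergeSortA arr = PySem.List.sorted arr (fun x => x) false :=
  (PySem.List.sorted_id_eq_of_perm_of_pairwise _ _ (mergeSortA_perm arr) (mergeSortA_pairwise arr)).symm

theorem arrangeB_append_pair {α : Type} (b : List α) (x y : α) :
    arrangeB (b ++ [x, y]) = x :: (arrangeB b ++ [y]) := by
  simp [arrangeB, List.foldl_append]

theorem arrange_eq_aux {α : Type} : ∀ (n : Nat) (arr : List α), arr.length ≤ n → arrangeA arr = arrangeB arr := by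
  intro n
  induction n with
  | zero =>
      intro arr hle
      have : arr = [] := List.eq_nil_of_length_eq_zero (by omega)
      subst this; simp [arrangeA, arrangeB]
  | succ n ih =>
      intro arr hle
      by_cases h : arr.length < 3
      · rcases arr with _ | ⟨a, _ | ⟨b, _ | ⟨c, t⟩⟩⟩
        · simp [arrangeA, arrangeB]
        · simp [arrangeA, arrangeB]
        · simp [arrangeA, arrangeB]
        · simp at h; omega
      · rcases List.eq_nil_or_concat arr with rfl | ⟨l1, y, rfl⟩
        · simp at h
        rcases List.eq_nil_or_concat l1 with rfl | ⟨l2, x, rfl⟩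
        · simp at h
        have harr : (l2.concat x).concat y = l2 ++ [x, y] := by simp
        rw [harr] at h hle ⊢
        have hlen : (l2 ++ [x, y]).length = l2.length + 2 := by simp
        have hA : arrangeA (l2 ++ [x, y]) = [x] ++ arrangeA l2 ++ [y] := by
          rw [arrangeA, if_neg h]
          rw [PySem.List.pyGet?_neg_ofNat _ 2 (by omega) (by simp), PySem.List.pyGet?_neg_ofNat _ 1 (by omega) (by simp)]
          rw [sliceDropLastTwo]
          have h1 : (l2 ++ [x, y]).length - 2 = l2.length := by simp
          rw [h1, List.take_left]
          congr 1
          · congr 1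
            rw [List.getElem?_append_right (Nat.le_refl _)]
            rw [Nat.sub_self]
            rfl
          · have h3 : (l2 ++ [x, y]).length - 1 = l2.length + 1 := by simp
            rw [h3, List.getElem?_append_right (by omega)]
            rw [Nat.add_sub_cancel_left]
            rfl
        rw [hA, arrangeB_append_pair, ih l2 (by rw [hlen] at hle; omega)]
        simp

theorem arrangeA_eq_arrangeB {α : Type} (arr : List α) : arrangeA arr = arrangeB arr :=
  arrange_eq_aux arr.length arr (Nat.le_refl _)

theorem flattenA (matrix : List (List Int)) :
    matrix.foldl (fun acc row => row.foldl (fun a e => a ++ [e]) acc) ([] : List Int)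
      = matrix.flatMap (fun row => row) := by
  have key : ∀ (ms : List (List Int)) (acc : List Int),
      ms.foldl (fun acc row => row.foldl (fun a e => a ++ [e]) acc) acc
        = acc ++ ms.flatMap (fun row => row) := by
    intro ms
    induction ms with
    | nil => simp
    | cons r t ih =>
        intro acc
        rw [List.foldl_cons, PySem.List.foldl_append_singleton_eq_self, ih, List.flatMap_cons]
        simp
  simpa using key matrix []

theorem chunkA (n : Nat) (l : List Int) (s : List Int) (acc : List (List Int)) :
    (l.foldl (fun (st : List Int × List (List Int)) _ =>
        (PySem.List.slice st.1 (some (n : Int)) none,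
         st.2 ++ [arrangeA (PySem.List.slice st.1 none (some (n : Int)))]))
      (s, acc)).2
    = acc ++ (List.range l.length).map (fun i => arrangeA ((s.drop (i * n)).take n)) := by
  induction l generalizing s acc with
  | nil => simp
  | cons hd tl ih =>
      rw [List.foldl_cons, ih, PySem.List.slice_to_natCast, PySem.List.slice_from_natCast]
      rw [List.length_cons, List.range_succ_eq_map, List.map_cons, List.map_map,
        List.append_assoc, List.singleton_append]
      congr 2
      · simp
      · congr 1
        funext i
        simp only [Function.comp_apply, List.drop_drop]
        congr 2
        rw [Nat.succ_mul]
        rw [Nat.add_comm]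

theorem sizing_eq (matrix : List (List Int)) : sizing matrix = sizing_alt matrix := by
  show arrangeA _ = arrangeB _
  rw [flattenA, mergeSortA_eq_sorted, chunkA, arrangeA_eq_arrangeB]
  congr 1
  set n := (PySem.List.pyGetD matrix 0 []).length with hn
  set flat := PySem.List.sorted (List.flatMap (fun row => row) matrix) (fun x => x) with hflat
  rw [List.nil_append, PySem.List.pyRange_one, List.map_map, List.length_map, List.length_range]
  have hm : ((matrix.length : Int) - 0).toNat = matrix.length := by omega
  rw [hm]
  congr 1
  funext k
  simp only [Function.comp_apply, zero_add]
  have h1 : (k : Int) * (n : Int) = ((k * n : Nat) : Int) := by push_cast; ring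
  have h2 : ((k : Int) + 1) * (n : Int) = ((k * n : Nat) : Int) + (n : Int) := by push_cast; ring
  rw [h1, h2, PySem.List.slice_natCast_add, arrangeA_eq_arrangeB]

-- ===== VERDICT (by name: the statement is the Claim_ definition above) =====
theorem sizing_spec : Claim_equal_sizing := by
  intro matrix _ _
  exact sizing_eq matrix
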